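-- pv_equiv track=rewrite | github.com/sheryllan/Algo | String/replace_number.py | replace
-- ===== SOURCE A (Python) =====
-- def replace(s: str) -> str:
--     num_str = 'number'
--     chars = []
--     found_num = False
--
--     for c in s:
--         if c.isdigit():
--             found_num = True
--         else:
--             if found_num:
--                 chars.append(num_str)
--             chars.append(c)
--             found_num = False
--
--     if found_num:
--         chars.append(num_str)
--
--     return ''.join(chars)
-- ===== SOURCE B (Python) =====
-- def replace(s: str) -> str:
--     # Two-pointer lexer: alternately slice off a maximal non-digit chunk and a
--     # maximal digit run; digit runs become 'number', no per-character state flag.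
--     pieces = []
--     i, n = 0, len(s)
--     while i < n:
--         j = i
--         while j < n and not s[j].isdigit():
--             j += 1
--         pieces.append(s[i:j])
--         if j < n:
--             while j < n and s[j].isdigit():
--                 j += 1
--             pieces.append('number')
--         i = j
--     return ''.join(pieces)
-- ===== Notes on version B (the rewrite author's own statement) =====
-- stated objective: alternative
-- what changed: Replaces A's per-character loop with a found_num boolean flag by an index-based two-pointer lexer: an outer loop that alternately advances j over a maximal non-digit chunk (appended as a slice) and a maximal digit run (appended as 'number'), with no boolean state carried between characters.
import Mathlib
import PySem

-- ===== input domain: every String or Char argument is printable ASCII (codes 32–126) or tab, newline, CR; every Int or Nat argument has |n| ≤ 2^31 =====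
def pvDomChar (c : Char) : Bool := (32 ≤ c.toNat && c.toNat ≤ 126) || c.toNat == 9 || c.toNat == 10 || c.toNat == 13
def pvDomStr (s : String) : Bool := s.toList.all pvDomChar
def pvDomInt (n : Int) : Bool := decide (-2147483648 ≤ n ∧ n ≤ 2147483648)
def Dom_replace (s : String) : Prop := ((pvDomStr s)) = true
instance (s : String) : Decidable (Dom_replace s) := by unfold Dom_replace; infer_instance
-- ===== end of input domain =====

-- B replaces A's per-character found_num flag loop by an index-based two-pointer lexer
-- that alternately slices off a maximal non-digit chunk and a maximal digit run (alternative).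


-- ===== PORT A =====
-- literal port: one step of A's loop body on the state (chars, found_num)
def stepA (st : List String × Bool) (c : Char) : List String × Bool :=
  if PySem.Chars.isdigit c then (st.1, true)
  else ((st.1 ++ (if st.2 then ["number"] else [])) ++ [String.ofList [c]], false)

def replace (s : String) : String :=
  let r := s.toList.foldl stepA ([], false)
  let chars := if r.2 then r.1 ++ ["number"] else r.1
  PySem.Str.join "" chars

-- ===== PORT B =====
-- port of B's lexer: each outer-loop iteration takes the maximal non-digit chunk
-- (the slice s[i:j]) and, if anything is left, skips the maximal digit run emitting "number".
-- length decreases because the digit run is nonempty (see goB_decr, used for termination).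
theorem goB_decr (cs r : List Char)
    (hr : r = cs.dropWhile (fun c => !PySem.Chars.isdigit c)) (hne : r ≠ []) :
    ((r.tail).dropWhile PySem.Chars.isdigit).length < cs.length := by
  have h1 : ((r.tail).dropWhile PySem.Chars.isdigit).length ≤ r.tail.length :=
    List.length_dropWhile_le _ _
  have h2 : (cs.takeWhile (fun c => !PySem.Chars.isdigit c)).length + r.length = cs.length := by
    rw [hr, ← List.length_append, List.takeWhile_append_dropWhile]
  have h3 : r.tail.length = r.length - 1 := List.length_tail
  have h4 : 1 ≤ r.length := List.length_pos_iff.mpr hne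
  omega

def goB (cs : List Char) : List String :=
  if cs = [] then []
  else
    let r := cs.dropWhile (fun c => !PySem.Chars.isdigit c)
    if hne : r = [] then [String.ofList (cs.takeWhile (fun c => !PySem.Chars.isdigit c))]
    else String.ofList (cs.takeWhile (fun c => !PySem.Chars.isdigit c)) :: "number"
          :: goB ((r.tail).dropWhile PySem.Chars.isdigit)
  termination_by cs.length
  decreasing_by exact goB_decr cs _ rfl hne

def replace_alt (s : String) : String := PySem.Str.join "" (goB s.toList)

-- ===== PRECONDITION & SPEC =====
def Spec_replace (s : String) (out : String) : Prop := out = replace_alt s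
instance (s : String) (out : String) : Decidable (Spec_replace s out) := by unfold Spec_replace; infer_instance

-- ===== CLAIM (what is proved, stated in full; the proofs are below) =====
def Claim_equal_replace : Prop := ∀ (s : String), Dom_replace s → Spec_replace s (replace s)

-- ===== LEMMAS AND PROOFS =====

-- joining strings with the empty separator is string concatenation
theorem join0_nil : PySem.Str.join "" ([] : List String) = "" := by
  simp [PySem.Str.join, PySem.Chars.join, List.intercalate]

theorem join0_cons (x : String) (l : List String) :
    PySem.Str.join "" (x :: l) = x ++ PySem.Str.join "" l := by
  cases l with
  | nil => simp [PySem.Str.join, PySem.Chars.join, List.intercalate]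
  | cons y l =>
    apply String.ext (h := ?_)
    simp [PySem.Str.join, PySem.Chars.join_cons_cons]

-- B's value on a character list
def J (cs : List Char) : String := PySem.Str.join "" (goB cs)

theorem goB_nil : goB [] = [] := by rw [goB.eq_def]; simp

theorem J_nil : J [] = "" := by rw [J, goB_nil]; exact join0_nil

theorem J_cons_digit (c : Char) (cs : List Char) (hc : PySem.Chars.isdigit c = true) :
    J (c :: cs) = "number" ++ J (cs.dropWhile PySem.Chars.isdigit) := by
  have hdw : (c :: cs).dropWhile (fun c => !PySem.Chars.isdigit c) = c :: cs := by
    simp [List.dropWhile_cons, hc]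
  have htw : (c :: cs).takeWhile (fun c => !PySem.Chars.isdigit c) = [] := by
    simp [List.takeWhile_cons, hc]
  rw [J, goB.eq_def]
  simp only [hdw, htw, List.cons_ne_self, if_false, List.tail_cons, dif_neg,
    reduceCtorEq, not_false_iff]
  rw [join0_cons, join0_cons]
  show String.ofList [] ++ _ = _
  rw [J]
  rfl

theorem J_cons_nondigit (c : Char) (cs : List Char) (hc : PySem.Chars.isdigit c = false) :
    J (c :: cs) = String.ofList [c] ++ J cs := by
  have htw : (c :: cs).takeWhile (fun c => !PySem.Chars.isdigit c)
      = c :: cs.takeWhile (fun c => !PySem.Chars.isdigit c) := by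
    simp [List.takeWhile_cons, hc]
  have hdw : (c :: cs).dropWhile (fun c => !PySem.Chars.isdigit c)
      = cs.dropWhile (fun c => !PySem.Chars.isdigit c) := by
    simp [List.dropWhile_cons, hc]
  have hmk : ∀ p : List Char, String.ofList (c :: p) = String.ofList [c] ++ String.ofList p := by
    intro p; apply String.ext (h := ?_); simp
  rw [J, J, goB.eq_def, goB.eq_def]
  cases cs with
  | nil =>
    simp only [reduceCtorEq, if_false, if_true, List.dropWhile_cons, List.dropWhile_nil,
      List.takeWhile_cons, List.takeWhile_nil, hc, Bool.not_false, if_pos, dif_pos]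
    rw [join0_cons, join0_nil]
  | cons d ds =>
    simp only [reduceCtorEq, if_false, htw, hdw]
    by_cases hr : (d :: ds).dropWhile (fun c => !PySem.Chars.isdigit c) = []
    · rw [dif_pos hr, dif_pos hr]
      simp only [join0_cons, join0_nil]
      rw [hmk]
      simp [String.append_assoc]
    · rw [dif_neg hr, dif_neg hr]
      simp only [join0_cons]
      rw [hmk]
      simp [String.append_assoc]

-- the tail of A's loop: what gets appended after a given state
def tailA : List Char → Bool → List String
  | [], found => if found then ["number"] else []
  | c :: cs, found =>
    if PySem.Chars.isdigit c then tailA cs true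
    else (if found then ["number", String.ofList [c]] else [String.ofList [c]]) ++ tailA cs false

theorem foldl_tailA (cs : List Char) : ∀ (acc : List String) (found : Bool),
    (let r := cs.foldl stepA (acc, found)
     if r.2 then r.1 ++ ["number"] else r.1) = acc ++ tailA cs found := by
  induction cs with
  | nil => intro acc found; cases found <;> simp [tailA]
  | cons c cs ih =>
    intro acc found
    simp only [List.foldl_cons]
    by_cases hd : PySem.Chars.isdigit c
    · have hs : stepA (acc, found) c = (acc, true) := by simp [stepA, hd]
      rw [hs, ih acc true]
      simp [tailA, hd]
    · cases found with
      | false =>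
        have hs : stepA (acc, false) c = (acc ++ [String.ofList [c]], false) := by
          simp [stepA, hd]
        rw [hs, ih _ false]
        simp [tailA, hd]
      | true =>
        have hs : stepA (acc, true) c = (acc ++ ["number", String.ofList [c]], false) := by
          simp [stepA, hd]
        rw [hs, ih _ false]
        simp [tailA, hd]

theorem tailA_J (cs : List Char) : ∀ found : Bool,
    PySem.Str.join "" (tailA cs found) =
      if found then "number" ++ J (cs.dropWhile PySem.Chars.isdigit) else J cs := by
  induction cs with
  | nil =>
    intro found
    cases found <;> simp [tailA, J_nil, join0_cons, join0_nil]
  | cons c cs ih =>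
    intro found
    by_cases hc : PySem.Chars.isdigit c
    · have hdw : (c :: cs).dropWhile PySem.Chars.isdigit = cs.dropWhile PySem.Chars.isdigit := by
        simp [List.dropWhile_cons, hc]
      simp only [tailA, hc, if_pos, ih true, hdw, J_cons_digit c cs hc]
      cases found <;> simp
    · have hdw : (c :: cs).dropWhile PySem.Chars.isdigit = c :: cs := by
        simp [List.dropWhile_cons, hc]
      cases found <;>
        simp [tailA, hc, hdw, join0_cons, ih false, J_cons_nondigit c cs (by simpa using hc),
          String.append_assoc]

-- ===== VERDICT (by name: the statement is the Claim_ definition above) =====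
theorem replace_spec : Claim_equal_replace := by
  intro s _
  show replace s = replace_alt s
  have h1 := foldl_tailA s.toList [] false
  have h2 := tailA_J s.toList false
  simp only [List.nil_append] at h1
  simp only [if_neg Bool.false_ne_true] at h2
  simp only [replace]
  rw [h1, h2]
  rfl
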